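-- pv_equiv track=rewrite | github.com/chidubemOkafor/python_class | functions/assignments/assignment2.py | largest_divisible
-- ===== SOURCE A (Python) =====
-- def largest_divisible(n,numbers):
--     listOf = []
--     for num in numbers:
--         if num % n == 0:
--              listOf.append(num)
--     if len(listOf) == 0:
--         return None
--     maxnum = max(listOf)
--     return maxnum
-- ===== SOURCE B (Python) =====
-- def largest_divisible(n, numbers):
--     best = None
--     for num in numbers:
--         if num % n == 0 and (best is None or num > best):
--             best = num
--     return best
-- ===== Notes on version B (the rewrite author's own statement) =====
-- stated objective: simpler
-- what changed: Single pass with a scalar running maximum replaces building an intermediate list of divisible elements and then scanning it with max(); no intermediate list, one loop instead of two passes.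
import Mathlib
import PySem

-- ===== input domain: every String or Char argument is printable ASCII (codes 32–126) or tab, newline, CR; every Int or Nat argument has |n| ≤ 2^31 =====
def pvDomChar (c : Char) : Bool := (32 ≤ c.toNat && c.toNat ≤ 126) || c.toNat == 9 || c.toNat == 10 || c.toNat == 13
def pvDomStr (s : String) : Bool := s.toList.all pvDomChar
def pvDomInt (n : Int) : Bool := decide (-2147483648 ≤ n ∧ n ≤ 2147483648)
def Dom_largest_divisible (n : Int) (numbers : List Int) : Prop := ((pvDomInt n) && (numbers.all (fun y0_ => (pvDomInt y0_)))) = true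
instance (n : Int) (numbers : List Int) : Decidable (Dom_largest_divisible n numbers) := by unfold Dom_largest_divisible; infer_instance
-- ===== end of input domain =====

-- B replaces A's filter-into-a-list-then-max(two passes, O(n) extra space) by a single
-- pass maintaining a scalar running maximum (objective: simpler).

-- ===== PORT A =====
def largest_divisible (n : Int) (numbers : List Int) : Option Int :=
  let listOf := numbers.foldl
    (fun acc num => if PySem.Int.mod num n == 0 then acc ++ [num] else acc) []
  if listOf.length == 0 then none
  else PySem.List.max? listOf (fun y => y)

-- ===== PORT B =====
def largest_divisible_alt (n : Int) (numbers : List Int) : Option Int :=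
  numbers.foldl
    (fun best num =>
      if PySem.Int.mod num n == 0 &&
         (match best with | none => true | some b => decide (num > b))
      then some num else best)
    none

-- ===== PRECONDITION & SPEC =====
-- Python's 'num % n' raises ZeroDivisionError when n = 0 (in both A and B), which the
-- loop body reaches exactly when numbers is nonempty.
def Pre_largest_divisible (n : Int) (numbers : List Int) : Prop := n ≠ 0 ∨ numbers = []
instance (n : Int) (numbers : List Int) : Decidable (Pre_largest_divisible n numbers) := by
  unfold Pre_largest_divisible; infer_instance
def pvWitness_largest_divisible : Int × List Int := (3, [1, 6, 9, 4])

def Spec_largest_divisible (n : Int) (numbers : List Int) (out : Option Int) : Prop := out = largest_divisible_alt n numbers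
instance (n : Int) (numbers : List Int) (out : Option Int) : Decidable (Spec_largest_divisible n numbers out) := by unfold Spec_largest_divisible; infer_instance

-- ===== CLAIM (what is proved, stated in full; the proofs are below) =====
def Claim_equal_largest_divisible : Prop := ∀ (n : Int) (numbers : List Int), Dom_largest_divisible n numbers → Pre_largest_divisible n numbers → Spec_largest_divisible n numbers (largest_divisible n numbers)

-- ===== LEMMAS AND PROOFS =====

-- B's fold with a `some` accumulator is a plain running max over the divisible elements.
lemma alt_foldl_some (n : Int) (l : List Int) (b : Int) :
    l.foldl
      (fun best num =>
        if PySem.Int.mod num n == 0 &&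
           (match best with | none => true | some b => decide (num > b))
        then some num else best)
      (some b)
    = some ((l.filter (fun num => PySem.Int.mod num n == 0)).foldl max b) := by
  induction l generalizing b with
  | nil => rfl
  | cons x t ih =>
    simp only [List.foldl_cons, List.filter_cons]
    by_cases hx : PySem.Int.mod x n == 0
    · simp only [hx, Bool.true_and, decide_eq_true_eq, if_true]
      by_cases hlt : x > b
      · rw [if_pos hlt, ih, List.foldl_cons, max_eq_right hlt.le]
      · rw [if_neg hlt, ih, List.foldl_cons, max_eq_left (not_lt.mp hlt)]
    · rw [Bool.not_eq_true] at hx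
      simp only [hx, Bool.false_and, Bool.false_eq_true, if_false, ih]

-- B's fold equals none/the running max of the first divisible element over the rest.
lemma alt_foldl_none (n : Int) (l : List Int) :
    l.foldl
      (fun best num =>
        if PySem.Int.mod num n == 0 &&
           (match best with | none => true | some b => decide (num > b))
        then some num else best)
      none
    = match l.filter (fun num => PySem.Int.mod num n == 0) with
      | [] => none
      | x :: t => some (t.foldl max x) := by
  induction l with
  | nil => rfl
  | cons x t ih =>
    simp only [List.foldl_cons, List.filter_cons]
    by_cases hx : PySem.Int.mod x n == 0
    · simp only [hx, Bool.true_and, if_true, alt_foldl_some]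
    · rw [Bool.not_eq_true] at hx
      simp only [hx, Bool.false_and, Bool.false_eq_true, if_false, ih]

-- ===== VERDICT (by name: the statement is the Claim_ definition above) =====
theorem largest_divisible_spec : Claim_equal_largest_divisible := by
  intro n numbers _ _
  unfold Spec_largest_divisible largest_divisible largest_divisible_alt
  rw [PySem.List.foldl_append_if (fun num => PySem.Int.mod num n == 0) (fun x => x) numbers []]
  rw [alt_foldl_none]
  simp only [List.nil_append, List.map_id_fun', id]
  cases h : numbers.filter (fun num => PySem.Int.mod num n == 0) with
  | nil => simp
  | cons x t => simp [PySem.List.max?_id_cons]
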